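-- pv_equiv track=rewrite | github.com/Kevin-Haus24/CodeWars | 7 kyu/Ciphers #1 - The 01 Cipher.py | encode1
-- ===== SOURCE A (Python) =====
-- def encode1(s):
--     a = ''
--     for c in s:
--         if c.isalpha():
--             a += str(1 - ord(c) % 2)
--         else:
--             a += c
--     return a
-- ===== SOURCE B (Python) =====
-- def encode1(s):
--     # Divide and conquer: split the string in half, encode each half, concatenate.
--     if len(s) <= 1:
--         return str(1 - ord(s) % 2) if s.isalpha() else s
--     m = len(s) // 2
--     return encode1(s[:m]) + encode1(s[m:])
-- ===== Notes on version B (the rewrite author's own statement) =====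
-- stated objective: alternative
-- what changed: Replaces A's left-to-right accumulate loop with a divide-and-conquer recursion that splits the string in half, encodes each half independently and concatenates, with a single-character base case.
import Mathlib
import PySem

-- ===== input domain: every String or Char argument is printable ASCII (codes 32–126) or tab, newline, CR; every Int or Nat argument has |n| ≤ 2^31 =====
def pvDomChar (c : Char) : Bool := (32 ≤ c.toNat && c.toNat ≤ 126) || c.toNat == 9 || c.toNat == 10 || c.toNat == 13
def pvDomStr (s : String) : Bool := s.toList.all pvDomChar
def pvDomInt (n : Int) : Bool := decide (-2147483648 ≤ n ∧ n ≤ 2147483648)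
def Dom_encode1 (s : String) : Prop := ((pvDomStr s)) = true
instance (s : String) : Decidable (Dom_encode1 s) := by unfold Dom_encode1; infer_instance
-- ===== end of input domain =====

-- B replaces A's left-to-right accumulate loop with a divide-and-conquer recursion:
-- split in half, encode each half, concatenate (alternative decomposition, same result).

-- ===== PORT A =====
def encode1 (s : String) : String :=
  String.mk (s.toList.foldl
    (fun a c =>
      if PySem.Chars.isalpha c then
        a ++ (PySem.Int.toStr (1 - PySem.Int.mod (c.toNat : Int) 2)).toList
      else
        a ++ [c])
    [])

-- ===== PORT B =====
-- Source B's recursion on List Char.  'ord(s)' on the single-character string s is the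
-- code of its only char (here 'l.headD'; evaluated only when s.isalpha() holds, so l = [c]);
-- s[:m]/s[m:] with m = len//2 are List.take/List.drop (exact for 0 ≤ m ≤ len).
def encode1AltGo (l : List Char) : List Char :=
  if l.length ≤ 1 then
    if PySem.Chars.strIsalpha l then
      (PySem.Int.toStr (1 - PySem.Int.mod ((l.headD ' ').toNat : Int) 2)).toList
    else l
  else
    encode1AltGo (l.take (l.length / 2)) ++ encode1AltGo (l.drop (l.length / 2))
termination_by l.length
decreasing_by
  · simp only [List.length_take]; omega
  · simp only [List.length_drop]; omega

def encode1_alt (s : String) : String := String.mk (encode1AltGo s.toList)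

-- ===== PRECONDITION & SPEC =====
def Spec_encode1 (s : String) (out : String) : Prop := out = encode1_alt s
instance (s : String) (out : String) : Decidable (Spec_encode1 s out) := by unfold Spec_encode1; infer_instance

-- ===== CLAIM (what is proved, stated in full; the proofs are below) =====
def Claim_equal_encode1 : Prop := ∀ (s : String), Dom_encode1 s → Spec_encode1 s (encode1 s)

-- ===== LEMMAS AND PROOFS =====

-- per-character encoding both programs agree on
def pvStep (c : Char) : List Char :=
  if PySem.Chars.isalpha c then
    (PySem.Int.toStr (1 - PySem.Int.mod ((c.toNat : Nat) : Int) 2)).toList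
  else [c]

lemma encode1AltGo_eq (l : List Char) : encode1AltGo l = (l.map pvStep).flatten := by
  induction l using encode1AltGo.induct with
  | case1 l hle halpha =>
    rw [encode1AltGo, if_pos hle, if_pos halpha]
    match l, hle, halpha with
    | [c], _, halpha =>
      have hc : PySem.Chars.isalpha c = true := by
        simpa [PySem.Chars.strIsalpha] using halpha
      simp [pvStep, hc]
  | case2 l hle halpha =>
    rw [encode1AltGo, if_pos hle, if_neg halpha]
    match l, hle with
    | [], _ => simp
    | [c], _ =>
      have hc : PySem.Chars.isalpha c = false := by
        have := halpha; simp [PySem.Chars.strIsalpha] at this; simpa using this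
      simp [pvStep, hc]
  | case3 l hgt ih1 ih2 =>
    rw [encode1AltGo, if_neg hgt, ih1, ih2]
    rw [← List.flatten_append, ← List.map_append, List.take_append_drop]

lemma encode1_foldl_eq (l : List Char) (acc : List Char) :
    l.foldl
      (fun a c =>
        if PySem.Chars.isalpha c then
          a ++ (PySem.Int.toStr (1 - PySem.Int.mod (c.toNat : Int) 2)).toList
        else a ++ [c]) acc
    = acc ++ (l.map pvStep).flatten := by
  induction l generalizing acc with
  | nil => simp
  | cons c t ih =>
    simp only [List.foldl_cons, List.map_cons, List.flatten_cons]
    rw [ih]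
    by_cases h : PySem.Chars.isalpha c = true
    · simp [pvStep, h, List.append_assoc]
    · simp only [Bool.not_eq_true] at h
      simp [pvStep, h, List.append_assoc]

-- ===== VERDICT (by name: the statement is the Claim_ definition above) =====
theorem encode1_spec : Claim_equal_encode1 := by
  intro s _
  unfold Spec_encode1 encode1 encode1_alt
  rw [encode1_foldl_eq s.toList [], encode1AltGo_eq]
  simp
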